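-- pv_equiv track=rewrite | github.com/rahul2008d/renting-in-london | tools/price_scorer.py | _build_score_summary
-- ===== SOURCE A (Python) =====
-- def _build_score_summary(ranked: list[dict]) -> dict[str, int]:
--     return {
--         "total_scored": len(ranked),
--         "highly_recommended": sum(
--             1 for r in ranked if r.get("recommendation_tier") == "Highly Recommended"
--         ),
--         "worth_viewing": sum(1 for r in ranked if r.get("recommendation_tier") == "Worth Viewing"),
--         "consider_if_flexible": sum(
--             1 for r in ranked if r.get("recommendation_tier") == "Consider If Flexible"
--         ),
--         "low_priority": sum(1 for r in ranked if r.get("recommendation_tier") == "Low Priority"),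
--         "from_top_picks": sum(1 for r in ranked if r.get("source_tier") == "top_pick"),
--         "from_trade_offs": sum(1 for r in ranked if r.get("source_tier") == "trade_off"),
--     }
-- ===== SOURCE B (Python) =====
-- def _build_score_summary(ranked: list[dict]) -> dict[str, int]:
--     h = w = c = l = t = o = 0
--     for r in ranked:
--         tier = r.get("recommendation_tier")
--         if tier == "Highly Recommended":
--             h += 1
--         elif tier == "Worth Viewing":
--             w += 1
--         elif tier == "Consider If Flexible":
--             c += 1
--         elif tier == "Low Priority":
--             l += 1
--         src = r.get("source_tier")
--         if src == "top_pick":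
--             t += 1
--         elif src == "trade_off":
--             o += 1
--     return {
--         "total_scored": len(ranked),
--         "highly_recommended": h,
--         "worth_viewing": w,
--         "consider_if_flexible": c,
--         "low_priority": l,
--         "from_top_picks": t,
--         "from_trade_offs": o,
--     }
-- ===== Notes on version B (the rewrite author's own statement) =====
-- stated objective: simpler
-- what changed: Replaces seven separate generator-expression scans of the list with a single pass that keeps six counters and classifies each row once via an if/elif chain.
import Mathlib
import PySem

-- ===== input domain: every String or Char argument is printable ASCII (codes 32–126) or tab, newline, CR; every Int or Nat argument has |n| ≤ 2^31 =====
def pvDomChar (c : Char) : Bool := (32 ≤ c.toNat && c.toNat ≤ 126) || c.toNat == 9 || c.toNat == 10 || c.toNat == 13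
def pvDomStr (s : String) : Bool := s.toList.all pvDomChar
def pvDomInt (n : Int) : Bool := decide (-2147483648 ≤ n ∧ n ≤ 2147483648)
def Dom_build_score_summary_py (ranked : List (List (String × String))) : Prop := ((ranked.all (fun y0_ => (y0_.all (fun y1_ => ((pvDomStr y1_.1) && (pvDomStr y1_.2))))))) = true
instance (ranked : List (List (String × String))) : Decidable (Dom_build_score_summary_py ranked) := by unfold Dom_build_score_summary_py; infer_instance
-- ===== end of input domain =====

-- B replaces A's seven separate scans of `ranked` by one pass with six counters (objective: simpler).

-- ===== PORT A =====
-- r.get(key): first-match lookup in the association list (Python dict semantics)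
def pvGetA (r : List (String × String)) (k : String) : Option String :=
  (PySem.Dict.mk r).get? k

-- sum(1 for r in ranked if r.get(key) == val)
def pvSumIf (ranked : List (List (String × String))) (key val : String) : Int :=
  ranked.foldl (fun acc r => if pvGetA r key = some val then acc + 1 else acc) 0

def build_score_summary_py (ranked : List (List (String × String))) : List (String × Int) :=
  [ ("total_scored", (ranked.length : Int)),
    ("highly_recommended", pvSumIf ranked "recommendation_tier" "Highly Recommended"),
    ("worth_viewing", pvSumIf ranked "recommendation_tier" "Worth Viewing"),
    ("consider_if_flexible", pvSumIf ranked "recommendation_tier" "Consider If Flexible"),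
    ("low_priority", pvSumIf ranked "recommendation_tier" "Low Priority"),
    ("from_top_picks", pvSumIf ranked "source_tier" "top_pick"),
    ("from_trade_offs", pvSumIf ranked "source_tier" "trade_off") ]

-- ===== PORT B =====
-- the single for-loop of Source B: six accumulators, if/elif chains per row
def pvLoopB (ranked : List (List (String × String))) (h w c l t o : Int) :
    Int × Int × Int × Int × Int × Int :=
  match ranked with
  | [] => (h, w, c, l, t, o)
  | r :: rest =>
    let tier := pvGetA r "recommendation_tier"
    let src := pvGetA r "source_tier"
    let dRec : Int × Int × Int × Int :=
      if tier = some "Highly Recommended" then (1, 0, 0, 0)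
      else if tier = some "Worth Viewing" then (0, 1, 0, 0)
      else if tier = some "Consider If Flexible" then (0, 0, 1, 0)
      else if tier = some "Low Priority" then (0, 0, 0, 1)
      else (0, 0, 0, 0)
    let dSrc : Int × Int :=
      if src = some "top_pick" then (1, 0)
      else if src = some "trade_off" then (0, 1)
      else (0, 0)
    pvLoopB rest (h + dRec.1) (w + dRec.2.1) (c + dRec.2.2.1) (l + dRec.2.2.2)
      (t + dSrc.1) (o + dSrc.2)

def build_score_summary_py_alt (ranked : List (List (String × String))) : List (String × Int) :=
  let s := pvLoopB ranked 0 0 0 0 0 0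
  [ ("total_scored", (ranked.length : Int)),
    ("highly_recommended", s.1),
    ("worth_viewing", s.2.1),
    ("consider_if_flexible", s.2.2.1),
    ("low_priority", s.2.2.2.1),
    ("from_top_picks", s.2.2.2.2.1),
    ("from_trade_offs", s.2.2.2.2.2) ]

-- ===== PRECONDITION & SPEC =====
def Spec_build_score_summary_py (ranked : List (List (String × String))) (out : List (String × Int)) : Prop := out = build_score_summary_py_alt ranked
instance (ranked : List (List (String × String))) (out : List (String × Int)) : Decidable (Spec_build_score_summary_py ranked out) := by unfold Spec_build_score_summary_py; infer_instance

-- ===== CLAIM (what is proved, stated in full; the proofs are below) =====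
def Claim_equal_build_score_summary_py : Prop := ∀ (ranked : List (List (String × String))), Dom_build_score_summary_py ranked → Spec_build_score_summary_py ranked (build_score_summary_py ranked)

-- ===== LEMMAS AND PROOFS =====

-- A's fold started from a is a plus the fold from 0
theorem pvSumIf_shift (key val : String) (xs : List (List (String × String))) :
    ∀ a : Int,
      xs.foldl (fun acc r => if pvGetA r key = some val then acc + 1 else acc) a
        = a + pvSumIf xs key val := by
  induction xs with
  | nil => intro a; simp [pvSumIf]
  | cons x rest ih =>
    intro a
    simp only [pvSumIf, List.foldl_cons]
    rw [ih, ih]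
    split_ifs <;> omega

theorem pvSumIf_cons (key val : String) (r : List (String × String))
    (rest : List (List (String × String))) :
    pvSumIf (r :: rest) key val
      = (if pvGetA r key = some val then (1 : Int) else 0) + pvSumIf rest key val := by
  simp only [pvSumIf, List.foldl_cons]
  rw [pvSumIf_shift]
  simp only [pvSumIf]
  split_ifs <;> omega

theorem pvLoopB_spec (ranked : List (List (String × String))) :
    ∀ h w c l t o : Int,
      pvLoopB ranked h w c l t o
        = (h + pvSumIf ranked "recommendation_tier" "Highly Recommended",
           w + pvSumIf ranked "recommendation_tier" "Worth Viewing",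
           c + pvSumIf ranked "recommendation_tier" "Consider If Flexible",
           l + pvSumIf ranked "recommendation_tier" "Low Priority",
           t + pvSumIf ranked "source_tier" "top_pick",
           o + pvSumIf ranked "source_tier" "trade_off") := by
  induction ranked with
  | nil => intro h w c l t o; simp [pvLoopB, pvSumIf]
  | cons r rest ih =>
    intro h w c l t o
    rw [pvLoopB, ih]
    simp only [pvSumIf_cons, Prod.mk.injEq]
    refine ⟨?_, ?_, ?_, ?_, ?_, ?_⟩ <;> split_ifs <;> simp_all <;> ring

-- ===== VERDICT (by name: the statement is the Claim_ definition above) =====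
theorem build_score_summary_py_spec : Claim_equal_build_score_summary_py := by
  intro ranked _
  show _ = _
  simp only [build_score_summary_py, build_score_summary_py_alt, pvLoopB_spec]
  norm_num
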